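-- pv_equiv track=rewrite | github.com/Glicmack/glicmack | apps/worker/src/unity/tile_generator.py | _index_catalog
-- ===== SOURCE A (Python) =====
-- def _index_catalog(catalog: dict) -> dict[str, list[str]]:
--     """Index tile IDs by category for fast lookup."""
--     index: dict[str, list[str]] = {}
--     for tile in catalog.get("tiles", []):
--         cat = tile["category"]
--         if cat not in index:
--             index[cat] = []
--         index[cat].append(tile["tile_id"])
--     return index
-- ===== SOURCE B (Python) =====
-- def _index_catalog(catalog: dict) -> dict[str, list[str]]:
--     """Index tile IDs by category for fast lookup."""
--     tiles = catalog.get("tiles", [])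
--     cats = dict.fromkeys(t["category"] for t in tiles)
--     return {c: [t["tile_id"] for t in tiles if t["category"] == c] for c in cats}
-- ===== Notes on version B (the rewrite author's own statement) =====
-- stated objective: alternative
-- what changed: Replaces the single-pass dict-bucketing loop by a two-phase decomposition: first collect the distinct categories in first-occurrence order (dict.fromkeys), then build each category's tile_id list with a per-category filtering comprehension.
import Mathlib
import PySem

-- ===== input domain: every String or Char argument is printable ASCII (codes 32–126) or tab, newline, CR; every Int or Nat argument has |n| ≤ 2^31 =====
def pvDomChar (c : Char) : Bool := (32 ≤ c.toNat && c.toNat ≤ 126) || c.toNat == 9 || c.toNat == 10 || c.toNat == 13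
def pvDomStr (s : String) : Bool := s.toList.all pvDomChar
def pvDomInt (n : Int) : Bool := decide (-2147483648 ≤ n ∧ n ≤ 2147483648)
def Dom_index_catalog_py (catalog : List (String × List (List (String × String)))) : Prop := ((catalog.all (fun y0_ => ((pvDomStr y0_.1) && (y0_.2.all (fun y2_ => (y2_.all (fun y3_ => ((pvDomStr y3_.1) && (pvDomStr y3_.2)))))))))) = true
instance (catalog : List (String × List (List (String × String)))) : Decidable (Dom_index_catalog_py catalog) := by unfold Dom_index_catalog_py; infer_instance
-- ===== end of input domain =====

-- B groups by category via a two-phase decomposition (ordered dedup of the categories, then one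
-- filtering pass per category) instead of A's single-pass dict bucketing; objective: alternative.

-- shared helpers: both Pythons read tile["category"] and tile["tile_id"] (total form; exact under Pre_)
def pvCatOf (t : List (String × String)) : String := (PySem.Dict.mk t).getD "category" ""
def pvTidOf (t : List (String × String)) : String := (PySem.Dict.mk t).getD "tile_id" ""

-- ===== PORT A =====
def index_catalog_py (catalog : List (String × List (List (String × String)))) : List (String × List String) :=
  let tiles := (PySem.Dict.mk catalog).getD "tiles" []
  let index := tiles.foldl (fun index tile =>
      let cat := pvCatOf tile
      let index := if index.contains cat then index else index.insert cat []
      index.modify cat [] (fun l => l ++ [pvTidOf tile]))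
    PySem.Dict.empty
  index.items

-- ===== PORT B =====
def index_catalog_py_alt (catalog : List (String × List (List (String × String)))) : List (String × List String) :=
  let tiles := (PySem.Dict.mk catalog).getD "tiles" []
  let cats := PySem.List.dedup (tiles.map (fun t => pvCatOf t))
  cats.map (fun c => (c, (tiles.filter (fun t => pvCatOf t == c)).map (fun t => pvTidOf t)))

-- ===== PRECONDITION & SPEC =====
-- Pre_ excludes exactly the catalogs in which some tile dict lacks the "category" or the
-- "tile_id" key: there Python A (and Python B) raise KeyError.
def Pre_index_catalog_py (catalog : List (String × List (List (String × String)))) : Prop :=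
  ∀ t ∈ (PySem.Dict.mk catalog).getD "tiles" [],
    "category" ∈ t.map (·.1) ∧ "tile_id" ∈ t.map (·.1)
instance (catalog : List (String × List (List (String × String)))) : Decidable (Pre_index_catalog_py catalog) := by unfold Pre_index_catalog_py; infer_instance

def pvWitness_index_catalog_py : (List (String × List (List (String × String)))) :=
  [("tiles", [[("category", "a"), ("tile_id", "t1")],
              [("category", "b"), ("tile_id", "t2")],
              [("category", "a"), ("tile_id", "t3")]])]

def Spec_index_catalog_py (catalog : List (String × List (List (String × String)))) (out : List (String × List String)) : Prop := out = index_catalog_py_alt catalog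
instance (catalog : List (String × List (List (String × String)))) (out : List (String × List String)) : Decidable (Spec_index_catalog_py catalog out) := by unfold Spec_index_catalog_py; infer_instance

-- ===== CLAIM (what is proved, stated in full; the proofs are below) =====
def Claim_equal_index_catalog_py : Prop := ∀ (catalog : List (String × List (List (String × String)))), Dom_index_catalog_py catalog → Pre_index_catalog_py catalog → Spec_index_catalog_py catalog (index_catalog_py catalog)

-- ===== LEMMAS AND PROOFS =====

-- A's loop body ("insert empty bucket if absent, then append") is one dict modify.
theorem pv_step_eq (d : PySem.Dict String (List String)) (k : String) (x : String) :
    ((if d.contains k then d else d.insert k []).modify k [] (fun l => l ++ [x]))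
      = d.modify k [] (fun l => l ++ [x]) := by
  by_cases h : d.contains k
  · simp [h]
  · rw [if_neg (by simp [h])]
    replace h : d.contains k = false := by simpa using h
    simp only [PySem.Dict.modify, PySem.Dict.getD_insert_self,
      PySem.Dict.getD_of_not_contains _ _ h]
    apply PySem.Dict.ext
    rw [PySem.Dict.items_insert_of_contains _ _ (by simp),
        PySem.Dict.items_insert_of_not_contains _ _ h,
        PySem.Dict.items_insert_of_not_contains _ _ h]
    simp only [List.map_append, List.map_cons, List.map_nil, beq_self_eq_true, if_true]
    congr 1
    have hk : ∀ p ∈ d.items, (p.1 == k) = false := by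
      intro p hp
      by_contra hne
      have hpk : p.1 = k := by simpa using hne
      have : d.contains k = true :=
        (PySem.Dict.contains_iff_mem_keys d k).2 (hpk ▸ List.mem_map.2 ⟨p, hp, rfl⟩)
      simp [this] at h
    calc List.map (fun p => if (p.1 == k) = true then (k, [] ++ [x]) else p) d.items
        = List.map id d.items := List.map_congr_left (fun p hp => by simp [hk p hp])
      _ = d.items := List.map_id _

-- a dict with Nodup keys is the map of its keys to their values
theorem pv_items_char {κ ν : Type} [BEq κ] [LawfulBEq κ] (D : PySem.Dict κ (List ν)) (h : D.keys.Nodup) :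
    D.keys.map (fun k => (k, D.getD k [])) = D.items := by
  simp only [PySem.Dict.keys, List.map_map]
  calc D.items.map (fun p => (p.1, D.getD p.1 []))
      = D.items.map id := List.map_congr_left (fun p hp => by
          have hp' : (p.1, p.2) ∈ D.items := by simpa using hp
          simp [PySem.Dict.getD_of_mem_items _ hp' h])
    _ = D.items := List.map_id _

-- the core equality, stated on the tile list both ports extract the same way
theorem pv_core (tiles : List (List (String × String))) :
    (tiles.foldl (fun index tile => index.modify (pvCatOf tile) [] (fun l => l ++ [pvTidOf tile])) PySem.Dict.empty).items
    = (PySem.List.dedup (tiles.map (fun t => pvCatOf t))).map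
        (fun c => (c, (tiles.filter (fun t => pvCatOf t == c)).map (fun t => pvTidOf t))) := by
  have hfold : tiles.foldl (fun index tile => index.modify (pvCatOf tile) [] (fun l => l ++ [pvTidOf tile])) PySem.Dict.empty
      = (tiles.map (fun t => (pvCatOf t, pvTidOf t))).foldl
          (fun d p => d.modify p.1 [] (fun l => l ++ [p.2])) PySem.Dict.empty := by
    rw [List.foldl_map]
  set D := tiles.foldl (fun index tile => index.modify (pvCatOf tile) [] (fun l => l ++ [pvTidOf tile])) PySem.Dict.empty with hD
  have hkeys : D.keys = PySem.Set.ofList (tiles.map (fun t => pvCatOf t)) := by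
    rw [hfold, PySem.Dict.keys_foldl_modify_key]
    simp [PySem.Set.update_nil_left, List.map_map, PySem.Dict.keys_empty, Function.comp_def]
  have hnodup : D.keys.Nodup := hkeys ▸ PySem.Set.nodup_ofList _
  have hval : ∀ c, D.getD c [] = (tiles.filter (fun t => pvCatOf t == c)).map (fun t => pvTidOf t) := by
    intro c
    rw [hfold, PySem.Dict.getD_foldl_modify_append]
    simp [PySem.Dict.getD_empty, List.filter_map, Function.comp_def, List.map_map]
  rw [← pv_items_char D hnodup, hkeys, PySem.List.dedup_eq_ofList]
  exact List.map_congr_left (fun c _ => by rw [hval c])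

-- ===== VERDICT (by name: the statement is the Claim_ definition above) =====
theorem index_catalog_py_spec : Claim_equal_index_catalog_py := by
  intro catalog _ _
  unfold Spec_index_catalog_py index_catalog_py index_catalog_py_alt
  dsimp only
  have hbody : (fun (index : PySem.Dict String (List String)) tile =>
        let cat := pvCatOf tile
        let index := if index.contains cat then index else index.insert cat []
        index.modify cat [] (fun l => l ++ [pvTidOf tile]))
      = (fun (index : PySem.Dict String (List String)) tile =>
          index.modify (pvCatOf tile) [] (fun l => l ++ [pvTidOf tile])) := by
    funext d t
    exact pv_step_eq d (pvCatOf t) (pvTidOf t)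
  rw [hbody, pv_core]
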